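-- pv_equiv track=rewrite | github.com/pypi-data/pypi-mirror-399 | packages/mind-mcp/mind_mcp-0.2.0-py3-none-any.whl/runtime/init_cmd.py | _escape_marker_tokens
-- ===== SOURCE A (Python) =====
-- def _escape_marker_tokens(content: str) -> str:
--     """Escape special markers so generated prompts don't trigger scanners."""
--     replacements = {
--         "@mind:doctor:escalation": "@mind&#58;doctor&#58;escalation",
--         "@mind:escalation": "@mind&#58;escalation",
--         "@mind:doctor:proposition": "@mind&#58;doctor&#58;proposition",
--         "@mind:proposition": "@mind&#58;proposition",
--         "@mind:doctor:todo": "@mind&#58;doctor&#58;todo",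
--         "@mind:todo": "@mind&#58;todo",
--     }
--     for source, target in replacements.items():
--         content = content.replace(source, target)
--     return content
-- ===== SOURCE B (Python) =====
-- def _escape_marker_tokens(content: str) -> str:
--     """Escape special markers in ONE left-to-right pass instead of six replace scans."""
--     words = ("escalation", "proposition", "todo")
--     out = []
--     i = 0
--     n = len(content)
--     while i < n:
--         tok = None
--         for p in ("@mind:doctor:", "@mind:"):
--             if content.startswith(p, i):
--                 for w in words:
--                     if content.startswith(w, i + len(p)):
--                         tok = p + w
--                         break
--             if tok:
--                 break
--         if tok:
--             out.append(tok.replace(":", "&#58;"))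
--             i += len(tok)
--         else:
--             out.append(content[i])
--             i += 1
--     return "".join(out)
-- ===== Notes on version B (the rewrite author's own statement) =====
-- stated objective: alternative
-- what changed: Replaces six sequential whole-string str.replace passes with a single left-to-right scan that table-matches the marker prefix (with its optional doctor segment) plus a marker word at each position and emits either the escaped token or the current character.
import Mathlib
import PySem

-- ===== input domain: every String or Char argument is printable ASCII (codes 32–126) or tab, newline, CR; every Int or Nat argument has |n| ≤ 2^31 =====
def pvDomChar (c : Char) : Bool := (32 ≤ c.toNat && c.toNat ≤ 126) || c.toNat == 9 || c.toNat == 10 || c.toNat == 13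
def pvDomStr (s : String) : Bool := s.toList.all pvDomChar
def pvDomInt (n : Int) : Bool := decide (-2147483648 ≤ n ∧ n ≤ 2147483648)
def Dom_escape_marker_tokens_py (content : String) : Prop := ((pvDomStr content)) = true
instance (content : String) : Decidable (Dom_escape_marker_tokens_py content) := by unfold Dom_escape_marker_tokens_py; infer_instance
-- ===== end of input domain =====

set_option maxRecDepth 8000


-- B replaces A's six sequential whole-string replace passes by ONE left-to-right scan that
-- table-matches a marker token at each position (objective: alternative single-pass algorithm).

-- ===== PORT A =====
def escape_marker_tokens_py (content : String) : String :=
  let content := PySem.Str.replace content "@mind:doctor:escalation" "@mind&#58;doctor&#58;escalation"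
  let content := PySem.Str.replace content "@mind:escalation" "@mind&#58;escalation"
  let content := PySem.Str.replace content "@mind:doctor:proposition" "@mind&#58;doctor&#58;proposition"
  let content := PySem.Str.replace content "@mind:proposition" "@mind&#58;proposition"
  let content := PySem.Str.replace content "@mind:doctor:todo" "@mind&#58;doctor&#58;todo"
  let content := PySem.Str.replace content "@mind:todo" "@mind&#58;todo"
  content

-- ===== PORT B =====
-- the word table of Source B
def pvWords : List (List Char) := ["escalation".toList, "proposition".toList, "todo".toList]

-- content.startswith(p, i) + inner word loop of Source B (on the suffix starting at i)
def pvTryPrefix (s : List Char) (p : List Char) : Option (List Char) :=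
  if p.isPrefixOf s then
    (pvWords.find? (fun w => w.isPrefixOf (s.drop p.length))).map (fun w => p ++ w)
  else none

-- the `for p in ("@mind:doctor:", "@mind:")` loop of Source B
def pvMatchTok (s : List Char) : Option (List Char) :=
  match pvTryPrefix s "@mind:doctor:".toList with
  | some tok => some tok
  | none => pvTryPrefix s "@mind:".toList

-- tok.replace(":", "&#58;")
def pvEscTok (tok : List Char) : List Char := PySem.Chars.replace tok ":".toList "&#58;".toList

-- Source B's `while i < n` loop, ported with fuel = number of remaining characters
def pvScanGo : Nat → List Char → List Char
  | 0, _ => []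
  | _ + 1, [] => []
  | fuel + 1, c :: rest =>
    match pvMatchTok (c :: rest) with
    | some tok => pvEscTok tok ++ pvScanGo fuel ((c :: rest).drop tok.length)
    | none => c :: pvScanGo fuel rest

def escape_marker_tokens_py_alt (content : String) : String :=
  String.ofList (pvScanGo content.toList.length content.toList)

-- ===== PRECONDITION & SPEC =====
def Spec_escape_marker_tokens_py (content : String) (out : String) : Prop := out = escape_marker_tokens_py_alt content
instance (content : String) (out : String) : Decidable (Spec_escape_marker_tokens_py content out) := by unfold Spec_escape_marker_tokens_py; infer_instance

-- ===== CLAIM (what is proved, stated in full; the proofs are below) =====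
def Claim_equal_escape_marker_tokens_py : Prop := ∀ (content : String), Dom_escape_marker_tokens_py content → Spec_escape_marker_tokens_py content (escape_marker_tokens_py content)

-- ===== LEMMAS AND PROOFS =====

-- a prefix of an append is a prefix of the left part, or extends it
theorem pvPrefix_append_or {l l1 l2 : List Char} (h : l <+: l1 ++ l2) : l <+: l1 ∨ l1 <+: l := by
  rcases Nat.lt_or_ge l1.length l.length with h1 | h1
  · exact Or.inr (List.prefix_of_prefix_length_le (List.prefix_append l1 l2) h (Nat.le_of_lt h1))
  · exact Or.inl (List.prefix_of_prefix_length_le h (List.prefix_append l1 l2) h1)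

-- structural form of one CPython str.replace pass with nonempty pattern (o :: old')
def pvRepl (o : Char) (old' new : List Char) : List Char → List Char
  | [] => []
  | c :: t =>
    if (o :: old').isPrefixOf (c :: t) then new ++ pvRepl o old' new (t.drop old'.length)
    else c :: pvRepl o old' new t
termination_by l => l.length
decreasing_by all_goals simp

theorem pvRepl_nil (o : Char) (old' new : List Char) : pvRepl o old' new [] = [] := by
  rw [pvRepl]

theorem pvRepl_cons_neg {o : Char} {old' : List Char} (new : List Char) {c : Char} {t : List Char}
    (h : ¬ (o :: old') <+: (c :: t)) :
    pvRepl o old' new (c :: t) = c :: pvRepl o old' new t := by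
  rw [pvRepl, if_neg (by simpa [List.isPrefixOf_iff_prefix] using h)]

theorem pvRepl_match (o : Char) (old' new u : List Char) :
    pvRepl o old' new ((o :: old') ++ u) = new ++ pvRepl o old' new u := by
  show pvRepl o old' new (o :: (old' ++ u)) = _
  have h : (o :: old').isPrefixOf (o :: (old' ++ u)) = true :=
    List.isPrefixOf_iff_prefix.mpr (show (o :: old') <+: (o :: old') ++ u from List.prefix_append _ _)
  rw [pvRepl, if_pos h, List.drop_left]

-- PySem.Chars.replace (fuel + reversed accumulator) computes pvRepl
theorem pvGo_eq (o : Char) (old' new : List Char) :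
    ∀ (fuel : Nat) (l acc : List Char), l.length ≤ fuel →
      PySem.Chars.replace.go (o :: old') new fuel l acc = acc.reverse ++ pvRepl o old' new l := by
  intro fuel
  induction fuel with
  | zero =>
    intro l acc h
    have : l = [] := List.eq_nil_of_length_eq_zero (Nat.le_zero.mp h)
    subst this
    simp [PySem.Chars.replace.go, pvRepl_nil]
  | succ n ih =>
    intro l acc h
    match l with
    | [] => simp [PySem.Chars.replace.go, pvRepl_nil]
    | c :: t =>
      rw [PySem.Chars.replace.go]
      by_cases hp : (o :: old').isPrefixOf (c :: t)
      · rw [if_pos hp, ih _ _ (by simp at h ⊢; omega)]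
        rw [pvRepl, if_pos hp]
        simp
      · rw [if_neg hp, ih _ _ (by simp at h ⊢; omega)]
        rw [pvRepl, if_neg hp]
        simp

theorem pvReplace_eq (o : Char) (old' new s : List Char) :
    PySem.Chars.replace s (o :: old') new = pvRepl o old' new s := by
  rw [PySem.Chars.replace]
  simp [pvGo_eq o old' new s.length s [] (le_refl _)]

-- A's six passes as (pattern tail, replacement) pairs, in dict order
def pvPasses : List (List Char × List Char) :=
  [("mind:doctor:escalation".toList, "@mind&#58;doctor&#58;escalation".toList),
   ("mind:escalation".toList, "@mind&#58;escalation".toList),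
   ("mind:doctor:proposition".toList, "@mind&#58;doctor&#58;proposition".toList),
   ("mind:proposition".toList, "@mind&#58;proposition".toList),
   ("mind:doctor:todo".toList, "@mind&#58;doctor&#58;todo".toList),
   ("mind:todo".toList, "@mind&#58;todo".toList)]

def pvRun (ps : List (List Char × List Char)) (l : List Char) : List Char :=
  ps.foldl (fun acc pr => pvRepl '@' pr.1 pr.2 acc) l

theorem pvPortA_toList (content : String) :
    (escape_marker_tokens_py content).toList = pvRun pvPasses content.toList := by
  show (PySem.Str.replace _ _ _).toList = _
  simp only [PySem.Str.toList_replace]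
  rw [show ("@mind:doctor:escalation".toList : List Char) = '@' :: "mind:doctor:escalation".toList from rfl,
      show ("@mind:escalation".toList : List Char) = '@' :: "mind:escalation".toList from rfl,
      show ("@mind:doctor:proposition".toList : List Char) = '@' :: "mind:doctor:proposition".toList from rfl,
      show ("@mind:proposition".toList : List Char) = '@' :: "mind:proposition".toList from rfl,
      show ("@mind:doctor:todo".toList : List Char) = '@' :: "mind:doctor:todo".toList from rfl,
      show ("@mind:todo".toList : List Char) = '@' :: "mind:todo".toList from rfl,
      pvReplace_eq, pvReplace_eq, pvReplace_eq, pvReplace_eq, pvReplace_eq, pvReplace_eq]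
  rfl

-- one pass walks over an '@'-free block unchanged
theorem pvRepl_skip {o : Char} {old' new : List Char} {q : List Char} (v : List Char)
    (hq : ∀ ch ∈ q, ch ≠ o) :
    pvRepl o old' new (q ++ v) = q ++ pvRepl o old' new v := by
  induction q with
  | nil => simp
  | cons a q' ih =>
    have hne : ¬ (o :: old') <+: (a :: (q' ++ v)) := by
      intro hpre
      rcases List.cons_prefix_cons.mp hpre with ⟨h1, -⟩
      exact hq a (by simp) h1.symm
    show pvRepl o old' new (a :: (q' ++ v)) = _
    rw [pvRepl_cons_neg new hne, ih (fun ch hch => hq ch (by simp [hch]))]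
    rfl

-- one pass walks over a block '@'::q that its pattern does not match
theorem pvRepl_skip_block {o : Char} {old' new q : List Char} (v : List Char)
    (hq : ∀ ch ∈ q, ch ≠ o)
    (hnp : ¬ (o :: old') <+: (o :: q) ++ v) :
    pvRepl o old' new ((o :: q) ++ v) = (o :: q) ++ pvRepl o old' new v := by
  show pvRepl o old' new (o :: (q ++ v)) = _
  rw [pvRepl_cons_neg new (by exact hnp), pvRepl_skip v hq]
  rfl

-- no nonempty suffix of t begins inside new ++ anything
def pvCond (t new : List Char) : Prop :=
  ∀ t'' ∈ t.tails, t'' ≠ [] → ¬ t'' <+: new ∧ ¬ new <+: t''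

-- Bool bridges so the literal side conditions can be checked by `decide`
theorem pvNotPrefix {a b : List Char} (h : a.isPrefixOf b = false) : ¬ a <+: b := by
  rw [← List.isPrefixOf_iff_prefix, h]
  simp

theorem pvNoAt {l : List Char} (h : l.all (fun c => c != '@') = true) : ∀ ch ∈ l, ch ≠ '@' := by
  intro ch hch
  simpa using List.all_eq_true.mp h ch hch

theorem pvCond_of_B {t new : List Char}
    (h : (t.tails.all fun t'' => t''.isEmpty || (!t''.isPrefixOf new && !new.isPrefixOf t'')) = true) :
    pvCond t new := by
  intro t'' h1 h2
  have := List.all_eq_true.mp h t'' h1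
  rcases Bool.or_eq_true_iff.mp this with he | hb
  · exact absurd (List.isEmpty_iff.mp he) h2
  · rcases Bool.and_eq_true_iff.mp hb with ⟨hb1, hb2⟩
    exact ⟨pvNotPrefix (by simpa using hb1), pvNotPrefix (by simpa using hb2)⟩

-- a pattern t satisfying pvCond t new is a prefix of pvRepl's output only where it was one of the input
theorem pvReflect (o : Char) (old' new : List Char) :
    ∀ (n : Nat) (s t : List Char), s.length ≤ n → pvCond t new →
      t <+: pvRepl o old' new s → t <+: s := by
  intro n
  induction n with
  | zero =>
    intro s t h _ hp
    have : s = [] := List.eq_nil_of_length_eq_zero (Nat.le_zero.mp h)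
    subst this
    rw [pvRepl_nil] at hp
    exact hp
  | succ n ih =>
    intro s t hlen hc hp
    match s with
    | [] => rw [pvRepl_nil] at hp; exact hp
    | c :: rest =>
      by_cases hm : (o :: old') <+: (c :: rest)
      · rw [pvRepl, if_pos (List.isPrefixOf_iff_prefix.mpr hm)] at hp
        match t with
        | [] => exact List.nil_prefix
        | a :: t' =>
          rcases pvPrefix_append_or hp with h1 | h1
          · exact absurd h1 (hc (a :: t') ((List.mem_tails _ _).mpr List.suffix_rfl) (by simp)).1
          · exact absurd h1 (hc (a :: t') ((List.mem_tails _ _).mpr List.suffix_rfl) (by simp)).2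
      · rw [pvRepl_cons_neg new hm] at hp
        match t with
        | [] => exact List.nil_prefix
        | a :: t' =>
          rcases List.cons_prefix_cons.mp hp with ⟨rfl, hp'⟩
          have hc' : pvCond t' new := by
            intro t'' h1 h2
            exact hc t'' ((List.mem_tails _ _).mpr (((List.mem_tails _ _).mp h1).trans (List.suffix_cons a t'))) h2
          have := ih rest t' (by simp at hlen ⊢; omega) hc' hp'
          exact List.cons_prefix_cons.mpr ⟨rfl, this⟩

theorem pvRun_append (a b : List (List Char × List Char)) (l : List Char) :
    pvRun (a ++ b) l = pvRun b (pvRun a l) := by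
  simp [pvRun, List.foldl_append]

-- the chain copies an unmatched head character
theorem pvRun_copy (c : Char) :
    ∀ (ps : List (List Char × List Char)) (u : List Char),
      List.Pairwise (fun x y => pvCond ('@' :: y.1) x.2) ps →
      (∀ p ∈ ps, ¬ ('@' :: p.1) <+: (c :: u)) →
      pvRun ps (c :: u) = c :: pvRun ps u := by
  intro ps
  induction ps with
  | nil => intro u _ _; rfl
  | cons pr ps' ih =>
    intro u hpw hnp
    have hstep : pvRepl '@' pr.1 pr.2 (c :: u) = c :: pvRepl '@' pr.1 pr.2 u :=
      pvRepl_cons_neg pr.2 (hnp pr (by simp))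
    have hpw' := (List.pairwise_cons.mp hpw).2
    have hhead := (List.pairwise_cons.mp hpw).1
    show pvRun ps' (pvRepl '@' pr.1 pr.2 (c :: u)) = c :: pvRun ps' (pvRepl '@' pr.1 pr.2 u)
    rw [hstep]
    refine ih (pvRepl '@' pr.1 pr.2 u) hpw' ?_
    intro p hp hcontra
    have : ('@' :: p.1) <+: pvRepl '@' pr.1 pr.2 (c :: u) := by rw [hstep]; exact hcontra
    have := pvReflect '@' pr.1 pr.2 (c :: u).length (c :: u) ('@' :: p.1) (le_refl _)
      (hhead p hp) this
    exact hnp p (by simp [hp]) this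

-- the chain walks over an already-settled block '@'::q that no listed pattern matches
theorem pvRun_block (q : List Char) (hq : ∀ ch ∈ q, ch ≠ '@') :
    ∀ (ps : List (List Char × List Char)) (v : List Char),
      (∀ p ∈ ps, ¬ ('@' :: p.1) <+: ('@' :: q) ∧ ¬ ('@' :: q) <+: ('@' :: p.1)) →
      pvRun ps (('@' :: q) ++ v) = ('@' :: q) ++ pvRun ps v := by
  intro ps
  induction ps with
  | nil => intro v _; rfl
  | cons pr ps' ih =>
    intro v hnp
    have hstep : pvRepl '@' pr.1 pr.2 (('@' :: q) ++ v) = ('@' :: q) ++ pvRepl '@' pr.1 pr.2 v := by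
      refine pvRepl_skip_block v hq ?_
      intro hcontra
      rcases pvPrefix_append_or hcontra with h1 | h1
      · exact (hnp pr (by simp)).1 h1
      · exact (hnp pr (by simp)).2 h1
    show pvRun ps' (pvRepl '@' pr.1 pr.2 (('@' :: q) ++ v)) = _
    rw [hstep, ih (pvRepl '@' pr.1 pr.2 v) (fun p hp => hnp p (by simp [hp]))]
    rfl

-- the chain on a matched token: earlier passes skip it, its own pass escapes it, later passes skip the escape
theorem pvRun_match (tl nq : List Char) (ps₁ ps₂ : List (List Char × List Char)) (u : List Char)
    (hqtl : ∀ ch ∈ tl, ch ≠ '@') (hqnq : ∀ ch ∈ nq, ch ≠ '@')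
    (h1 : ∀ p ∈ ps₁, ¬ ('@' :: p.1) <+: ('@' :: tl) ∧ ¬ ('@' :: tl) <+: ('@' :: p.1))
    (h2 : ∀ p ∈ ps₂, ¬ ('@' :: p.1) <+: ('@' :: nq) ∧ ¬ ('@' :: nq) <+: ('@' :: p.1)) :
    pvRun (ps₁ ++ (tl, '@' :: nq) :: ps₂) (('@' :: tl) ++ u)
      = ('@' :: nq) ++ pvRun (ps₁ ++ (tl, '@' :: nq) :: ps₂) u := by
  rw [pvRun_append, pvRun_append, pvRun_block tl hqtl ps₁ u h1]
  show pvRun ps₂ (pvRepl '@' tl ('@' :: nq) (('@' :: tl) ++ pvRun ps₁ u)) = _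
  rw [pvRepl_match, pvRun_block nq hqnq ps₂ _ h2]
  rfl

-- ===== literal side conditions (decided once) =====
theorem pvC1 : List.Pairwise (fun x y => pvCond ('@' :: y.1) x.2) pvPasses := by
  refine .cons ?_ (.cons ?_ (.cons ?_ (.cons ?_ (.cons ?_ (.cons ?_ .nil))))) <;>
    (intro y hy; fin_cases hy <;> exact pvCond_of_B (by decide))

-- ===== the six token-step identities =====
theorem pvChain1 (u : List Char) :
    pvRun pvPasses ("@mind:doctor:escalation".toList ++ u)
      = "@mind&#58;doctor&#58;escalation".toList ++ pvRun pvPasses u :=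
  pvRun_match "mind:doctor:escalation".toList "mind&#58;doctor&#58;escalation".toList
    [] (pvPasses.drop 1) u (pvNoAt (by decide)) (pvNoAt (by decide))
    (by intro p hp; fin_cases hp <;> exact ⟨pvNotPrefix (by decide), pvNotPrefix (by decide)⟩)
    (by intro p hp; fin_cases hp <;> exact ⟨pvNotPrefix (by decide), pvNotPrefix (by decide)⟩)

theorem pvChain2 (u : List Char) :
    pvRun pvPasses ("@mind:escalation".toList ++ u)
      = "@mind&#58;escalation".toList ++ pvRun pvPasses u :=
  pvRun_match "mind:escalation".toList "mind&#58;escalation".toList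
    (pvPasses.take 1) (pvPasses.drop 2) u (pvNoAt (by decide)) (pvNoAt (by decide))
    (by intro p hp; fin_cases hp <;> exact ⟨pvNotPrefix (by decide), pvNotPrefix (by decide)⟩)
    (by intro p hp; fin_cases hp <;> exact ⟨pvNotPrefix (by decide), pvNotPrefix (by decide)⟩)

theorem pvChain3 (u : List Char) :
    pvRun pvPasses ("@mind:doctor:proposition".toList ++ u)
      = "@mind&#58;doctor&#58;proposition".toList ++ pvRun pvPasses u :=
  pvRun_match "mind:doctor:proposition".toList "mind&#58;doctor&#58;proposition".toList
    (pvPasses.take 2) (pvPasses.drop 3) u (pvNoAt (by decide)) (pvNoAt (by decide))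
    (by intro p hp; fin_cases hp <;> exact ⟨pvNotPrefix (by decide), pvNotPrefix (by decide)⟩)
    (by intro p hp; fin_cases hp <;> exact ⟨pvNotPrefix (by decide), pvNotPrefix (by decide)⟩)

theorem pvChain4 (u : List Char) :
    pvRun pvPasses ("@mind:proposition".toList ++ u)
      = "@mind&#58;proposition".toList ++ pvRun pvPasses u :=
  pvRun_match "mind:proposition".toList "mind&#58;proposition".toList
    (pvPasses.take 3) (pvPasses.drop 4) u (pvNoAt (by decide)) (pvNoAt (by decide))
    (by intro p hp; fin_cases hp <;> exact ⟨pvNotPrefix (by decide), pvNotPrefix (by decide)⟩)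
    (by intro p hp; fin_cases hp <;> exact ⟨pvNotPrefix (by decide), pvNotPrefix (by decide)⟩)

theorem pvChain5 (u : List Char) :
    pvRun pvPasses ("@mind:doctor:todo".toList ++ u)
      = "@mind&#58;doctor&#58;todo".toList ++ pvRun pvPasses u :=
  pvRun_match "mind:doctor:todo".toList "mind&#58;doctor&#58;todo".toList
    (pvPasses.take 4) (pvPasses.drop 5) u (pvNoAt (by decide)) (pvNoAt (by decide))
    (by intro p hp; fin_cases hp <;> exact ⟨pvNotPrefix (by decide), pvNotPrefix (by decide)⟩)
    (by intro p hp; fin_cases hp <;> exact ⟨pvNotPrefix (by decide), pvNotPrefix (by decide)⟩)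

theorem pvChain6 (u : List Char) :
    pvRun pvPasses ("@mind:todo".toList ++ u)
      = "@mind&#58;todo".toList ++ pvRun pvPasses u :=
  pvRun_match "mind:todo".toList "mind&#58;todo".toList
    (pvPasses.take 5) [] u (pvNoAt (by decide)) (pvNoAt (by decide))
    (by intro p hp; fin_cases hp <;> exact ⟨pvNotPrefix (by decide), pvNotPrefix (by decide)⟩)
    (by intro p hp; fin_cases hp <;> exact ⟨pvNotPrefix (by decide), pvNotPrefix (by decide)⟩)

-- the escaped form of each token
theorem pvEsc1 : pvEscTok "@mind:doctor:escalation".toList = "@mind&#58;doctor&#58;escalation".toList := by decide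
theorem pvEsc2 : pvEscTok "@mind:escalation".toList = "@mind&#58;escalation".toList := by decide
theorem pvEsc3 : pvEscTok "@mind:doctor:proposition".toList = "@mind&#58;doctor&#58;proposition".toList := by decide
theorem pvEsc4 : pvEscTok "@mind:proposition".toList = "@mind&#58;proposition".toList := by decide
theorem pvEsc5 : pvEscTok "@mind:doctor:todo".toList = "@mind&#58;doctor&#58;todo".toList := by decide
theorem pvEsc6 : pvEscTok "@mind:todo".toList = "@mind&#58;todo".toList := by decide

-- ===== reading pvMatchTok =====
theorem pvTryPrefix_some {s p tok : List Char} (h : pvTryPrefix s p = some tok) :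
    ∃ w, w ∈ pvWords ∧ tok = p ++ w ∧ p <+: s ∧ w <+: s.drop p.length := by
  unfold pvTryPrefix at h
  by_cases hp : p.isPrefixOf s
  · rw [if_pos hp] at h
    rcases Option.map_eq_some_iff.mp h with ⟨w, hw, rfl⟩
    exact ⟨w, List.mem_of_find?_eq_some hw, rfl, List.isPrefixOf_iff_prefix.mp hp,
      List.isPrefixOf_iff_prefix.mp (by simpa using List.find?_some hw)⟩
  · rw [if_neg hp] at h
    exact absurd h (by simp)

theorem pvTryPrefix_some_prefix {s p tok : List Char} (h : pvTryPrefix s p = some tok) :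
    tok <+: s := by
  rcases pvTryPrefix_some h with ⟨w, -, rfl, hp, hw⟩
  rcases hw with ⟨r, hr⟩
  rcases hp with ⟨d, hd⟩
  refine ⟨r, ?_⟩
  have hdrop : s.drop p.length = d := by rw [← hd, List.drop_left]
  rw [List.append_assoc, hr, hdrop, hd]

theorem pvMatchTok_some_cases {s tok : List Char} (h : pvMatchTok s = some tok) :
    tok <+: s ∧
      (tok = "@mind:doctor:escalation".toList ∨ tok = "@mind:doctor:proposition".toList ∨
       tok = "@mind:doctor:todo".toList ∨ tok = "@mind:escalation".toList ∨
       tok = "@mind:proposition".toList ∨ tok = "@mind:todo".toList) := by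
  unfold pvMatchTok at h
  cases h13 : pvTryPrefix s "@mind:doctor:".toList with
  | some t =>
    rw [h13] at h
    cases h
    refine ⟨pvTryPrefix_some_prefix h13, ?_⟩
    rcases pvTryPrefix_some h13 with ⟨w, hw, rfl, -, -⟩
    simp only [pvWords, List.mem_cons, List.not_mem_nil, or_false] at hw
    rcases hw with rfl | rfl | rfl
    · exact Or.inl rfl
    · exact Or.inr (Or.inl rfl)
    · exact Or.inr (Or.inr (Or.inl rfl))
  | none =>
    rw [h13] at h
    refine ⟨pvTryPrefix_some_prefix h, ?_⟩
    rcases pvTryPrefix_some h with ⟨w, hw, rfl, -, -⟩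
    simp only [pvWords, List.mem_cons, List.not_mem_nil, or_false] at hw
    rcases hw with rfl | rfl | rfl
    · exact Or.inr (Or.inr (Or.inr (Or.inl rfl)))
    · exact Or.inr (Or.inr (Or.inr (Or.inr (Or.inl rfl))))
    · exact Or.inr (Or.inr (Or.inr (Or.inr (Or.inr rfl))))

theorem pvTryPrefix_none {s p : List Char} (h : pvTryPrefix s p = none) :
    ∀ w ∈ pvWords, ¬ (p ++ w) <+: s := by
  intro w hw hcontra
  unfold pvTryPrefix at h
  by_cases hp : p.isPrefixOf s
  · rw [if_pos hp] at h
    rw [Option.map_eq_none_iff, List.find?_eq_none] at h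
    have hdrop : w <+: s.drop p.length := by
      rcases hcontra with ⟨r, hr⟩
      refine ⟨r, ?_⟩
      rw [← hr, List.append_assoc, List.drop_left]
    exact h w hw (List.isPrefixOf_iff_prefix.mpr hdrop)
  · exact hp (List.isPrefixOf_iff_prefix.mpr
      ((List.prefix_append p w).trans hcontra))

theorem pvMatchTok_none {s : List Char} (h : pvMatchTok s = none) :
    ∀ p ∈ pvPasses, ¬ ('@' :: p.1) <+: s := by
  have h13 : pvTryPrefix s "@mind:doctor:".toList = none := by
    cases h13 : pvTryPrefix s "@mind:doctor:".toList with
    | some t => rw [pvMatchTok, h13] at h; cases h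
    | none => rfl
  have h6 : pvTryPrefix s "@mind:".toList = none := by
    rw [pvMatchTok, h13] at h; exact h
  intro p hp
  simp only [pvPasses, List.mem_cons, List.not_mem_nil, or_false] at hp
  rcases hp with rfl | rfl | rfl | rfl | rfl | rfl
  · exact pvTryPrefix_none h13 "escalation".toList (by simp [pvWords])
  · exact pvTryPrefix_none h6 "escalation".toList (by simp [pvWords])
  · exact pvTryPrefix_none h13 "proposition".toList (by simp [pvWords])
  · exact pvTryPrefix_none h6 "proposition".toList (by simp [pvWords])
  · exact pvTryPrefix_none h13 "todo".toList (by simp [pvWords])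
  · exact pvTryPrefix_none h6 "todo".toList (by simp [pvWords])

-- ===== master equivalence: the six-pass chain computes the single scan =====
theorem pvRun_nil : pvRun pvPasses [] = [] := by
  simp [pvRun, pvPasses, pvRepl_nil]

theorem pvMaster : ∀ (fuel : Nat) (s : List Char), s.length ≤ fuel →
    pvRun pvPasses s = pvScanGo fuel s := by
  intro fuel
  induction fuel with
  | zero =>
    intro s h
    have : s = [] := List.eq_nil_of_length_eq_zero (Nat.le_zero.mp h)
    subst this
    rw [pvRun_nil]
    rfl
  | succ f ih =>
    intro s hlen
    match s with
    | [] => rw [pvRun_nil]; rfl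
    | c :: rest =>
      cases hm : pvMatchTok (c :: rest) with
      | some tok =>
        rcases pvMatchTok_some_cases hm with ⟨⟨u, hu⟩, hcase⟩
        have hscan : pvScanGo (f + 1) (c :: rest)
            = pvEscTok tok ++ pvScanGo f ((c :: rest).drop tok.length) := by
          simp only [pvScanGo, hm]
        have hdrop : (c :: rest).drop tok.length = u := by
          rw [← hu, List.drop_left]
        have hulen : u.length + tok.length = (c :: rest).length := by
          rw [← hu]; simp [Nat.add_comm]
        rcases hcase with rfl | rfl | rfl | rfl | rfl | rfl <;>
        · rw [hscan, hdrop, ← hu]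
          first
            | rw [pvEsc1] | rw [pvEsc2] | rw [pvEsc3]
            | rw [pvEsc4] | rw [pvEsc5] | rw [pvEsc6]
          first
            | rw [pvChain1] | rw [pvChain2] | rw [pvChain3]
            | rw [pvChain4] | rw [pvChain5] | rw [pvChain6]
          rw [ih u (by simp at hulen hlen; omega)]
      | none =>
        have hscan : pvScanGo (f + 1) (c :: rest) = c :: pvScanGo f rest := by
          simp only [pvScanGo, hm]
        rw [hscan, pvRun_copy c pvPasses rest pvC1 (pvMatchTok_none hm),
            ih rest (by simp at hlen; omega)]

-- ===== VERDICT (by name: the statement is the Claim_ definition above) =====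
theorem escape_marker_tokens_py_spec : Claim_equal_escape_marker_tokens_py := by
  intro content _
  unfold Spec_escape_marker_tokens_py escape_marker_tokens_py_alt
  calc escape_marker_tokens_py content
      = String.ofList (escape_marker_tokens_py content).toList := (String.ofList_toList).symm
    _ = String.ofList (pvScanGo content.toList.length content.toList) := by
        rw [pvPortA_toList, pvMaster content.toList.length content.toList (le_refl _)]
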